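-- pv_equiv track=rewrite | github.com/emacsmirror/wisp-mode | wisp.py | nobracketbreaks
-- ===== SOURCE A (Python) =====
-- def nobracketbreaks(code):
--     """remove linebreaks inside brackets (will be readded at the end)."""
--     inbracket = 0
--     nostringbreaks = []
--     for char in code:
--         if char == '(':
--             inbracket += 1
--         elif char == ')':
--             inbracket -= 1
--         if inbracket and char == "\n":
--             nostringbreaks.append("\\LINEBREAK")
--         else:
--             nostringbreaks.append(char)
--     return "".join(nostringbreaks)
-- ===== SOURCE B (Python) =====
-- def nobracketbreaks(code):
--     """remove linebreaks inside brackets (will be readded at the end)."""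
--     segs = code.split('\n')
--     depth = segs[0].count('(') - segs[0].count(')')
--     parts = [segs[0]]
--     for seg in segs[1:]:
--         parts.append('\\LINEBREAK' if depth else '\n')
--         parts.append(seg)
--         depth += seg.count('(') - seg.count(')')
--     return ''.join(parts)
-- ===== Notes on version B (the rewrite author's own statement) =====
-- stated objective: faster
-- what changed: Replaces the char-by-char state machine (per-character bracket updates and per-character list appends) by splitting on newlines once and interleaving whole segments with a separator chosen from a running bracket balance computed per segment via str.count.
import Mathlib
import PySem

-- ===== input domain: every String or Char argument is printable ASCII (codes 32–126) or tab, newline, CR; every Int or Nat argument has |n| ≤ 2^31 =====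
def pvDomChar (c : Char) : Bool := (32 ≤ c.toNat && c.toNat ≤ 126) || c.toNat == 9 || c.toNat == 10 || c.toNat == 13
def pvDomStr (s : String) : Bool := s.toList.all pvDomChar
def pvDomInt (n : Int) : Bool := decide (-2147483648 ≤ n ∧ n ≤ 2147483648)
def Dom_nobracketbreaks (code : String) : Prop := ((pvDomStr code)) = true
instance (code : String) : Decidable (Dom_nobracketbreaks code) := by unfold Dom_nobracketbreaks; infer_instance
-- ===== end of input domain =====

-- B replaces A's char-by-char bracket state machine by splitting on newlines once and
-- interleaving whole segments with separators chosen from a per-segment running bracket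
-- balance (same O(n), measured faster by a constant factor: bulk split/count per segment
-- instead of per-character work).

-- ===== PORT A =====
-- literal port of A: fold over the characters carrying (inbracket, collected pieces), join at the end
-- one iteration of A's for-loop: update inbracket, append the piece
def pvStepA (st : Int × List String) (char : Char) : Int × List String :=
  let inbracket := if char = '(' then st.1 + 1 else if char = ')' then st.1 - 1 else st.1
  if inbracket ≠ 0 ∧ char = '\n' then (inbracket, st.2 ++ ["\\LINEBREAK"])
  else (inbracket, st.2 ++ [String.singleton char])

def nobracketbreaks (code : String) : String :=
  let st := code.toList.foldl pvStepA (0, [])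
  PySem.Str.join "" st.2

-- ===== PORT B =====
-- seg.count('(') - seg.count(')')
def pvBal (seg : String) : Int :=
  (PySem.Str.count seg "(" : Int) - (PySem.Str.count seg ")" : Int)

-- port of B: split once on '\n' (split? is total here since the separator is nonempty),
-- then fold over the remaining segments carrying (depth, parts)
-- one iteration of B's for-loop: append the chosen separator and the segment, update depth
def pvStepB (st : Int × List String) (seg : String) : Int × List String :=
  (st.1 + pvBal seg, st.2 ++ [(if st.1 ≠ 0 then "\\LINEBREAK" else "\n"), seg])

def nobracketbreaks_alt (code : String) : String :=
  match PySem.Str.split? code "\n" with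
  | some (seg0 :: rest) =>
    let st := rest.foldl pvStepB (pvBal seg0, [seg0])
    PySem.Str.join "" st.2
  | _ => ""   -- unreachable: split on a nonempty separator returns a nonempty list

-- ===== PRECONDITION & SPEC =====
def Spec_nobracketbreaks (code : String) (out : String) : Prop := out = nobracketbreaks_alt code
instance (code : String) (out : String) : Decidable (Spec_nobracketbreaks code out) := by unfold Spec_nobracketbreaks; infer_instance

-- ===== CLAIM (what is proved, stated in full; the proofs are below) =====
def Claim_equal_nobracketbreaks : Prop := ∀ (code : String), Dom_nobracketbreaks code → Spec_nobracketbreaks code (nobracketbreaks code)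

-- ===== LEMMAS AND PROOFS =====

-- the bracket-depth update of A for one character
def pvStep (c : Char) (d : Int) : Int :=
  if c = '(' then d + 1 else if c = ')' then d - 1 else d

-- the pieces A appends, as a recursion over the characters
def pvSpecA : List Char → Int → List String
  | [], _ => []
  | c :: r, d =>
    (if pvStep c d ≠ 0 ∧ c = '\n' then "\\LINEBREAK" else String.singleton c)
      :: pvSpecA r (pvStep c d)

-- the pieces B appends after the first segment, as a recursion over the segments
def pvSpecB : List String → Int → List String
  | [], _ => []
  | seg :: r, d =>
    (if d ≠ 0 then "\\LINEBREAK" else "\n") :: seg :: pvSpecB r (d + pvBal seg)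

-- character-level balance
def pvBalC (cs : List Char) : Int := (cs.count '(' : Int) - (cs.count ')' : Int)

-- reference single-char split (what Chars.splitOn computes for separator ['\n'])
def pvSplit : List Char → List (List Char)
  | [] => [[]]
  | c :: r =>
    if c = '\n' then [] :: pvSplit r
    else match pvSplit r with
      | h :: t => (c :: h) :: t
      | [] => [[c]]

theorem pvSplit_ne_nil (cs : List Char) : pvSplit cs ≠ [] := by
  cases cs with
  | nil => simp [pvSplit]
  | cons c r =>
    simp only [pvSplit]
    split
    · simp
    · split <;> simp_all

theorem pvCountGo (c : Char) (l : List Char) :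
    ∀ (fuel acc : Nat), l.length ≤ fuel →
      PySem.Chars.count.go [c] fuel l acc = acc + l.count c := by
  induction l with
  | nil => intro fuel acc _; cases fuel <;> simp [PySem.Chars.count.go]
  | cons x r ih =>
    intro fuel acc h
    cases fuel with
    | zero => simp at h
    | succ f =>
      simp only [List.length_cons] at h
      simp only [PySem.Chars.count.go]
      by_cases hx : x = c
      · have hpre : List.isPrefixOf [c] (x :: r) = true := by simp [List.isPrefixOf, hx]
        rw [if_pos hpre]
        have hd : List.drop [c].length (x :: r) = r := by simp
        rw [hd, ih f (acc + 1) (by omega)]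
        subst hx
        simp [List.count_cons]
        omega
      · have hpre : List.isPrefixOf [c] (x :: r) = false := by
          simp [List.isPrefixOf]
          exact fun h' => hx h'.symm
        rw [if_neg (by simp [hpre])]
        rw [ih f acc (by omega)]
        simp [List.count_cons, hx]

theorem pvCount_single (c : Char) (cs : List Char) :
    PySem.Chars.count cs [c] = cs.count c := by
  simp only [PySem.Chars.count]
  rw [if_neg (by simp)]
  have := pvCountGo c cs cs.length 0 le_rfl
  omega

theorem pvBal_toList (seg : String) : pvBal seg = pvBalC seg.toList := by
  simp [pvBal, pvBalC, PySem.Str.count_eq, pvCount_single]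

theorem pvSplitGo (l : List Char) :
    ∀ (fuel : Nat) (cur : List Char) (acc : List (List Char)), l.length < fuel →
      PySem.Chars.splitOn.go ['\n'] fuel l cur acc =
        acc.reverse ++ (pvSplit l).modifyHead (cur.reverse ++ ·) := by
  induction l with
  | nil =>
    intro fuel cur acc h
    cases fuel with
    | zero => omega
    | succ f => simp [PySem.Chars.splitOn.go, pvSplit]
  | cons x r ih =>
    intro fuel cur acc h
    cases fuel with
    | zero => omega
    | succ f =>
      simp only [List.length_cons] at h
      by_cases hx : x = '\n'
      · subst hx
        have hpre : List.isPrefixOf ['\n'] ('\n' :: r) = true := by simp [List.isPrefixOf]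
        simp only [PySem.Chars.splitOn.go, hpre, if_pos, List.length_singleton, List.drop_one,
          List.tail_cons]
        rw [ih f [] (cur.reverse :: acc) (by omega)]
        simp only [pvSplit, if_pos]
        cases pvSplit r <;> simp [List.modifyHead]
      · have hpre : List.isPrefixOf ['\n'] (x :: r) = false := by
          simp [List.isPrefixOf]
          exact fun h' => hx h'.symm
        simp only [PySem.Chars.splitOn.go, hpre, Bool.false_eq_true, if_neg, not_false_iff]
        rw [ih f (x :: cur) acc (by omega)]
        simp only [pvSplit, hx, if_neg, not_false_iff]
        rcases hs : pvSplit r with _ | ⟨h0, t0⟩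
        · exact absurd hs (pvSplit_ne_nil r)
        · simp

theorem pvSplitOn_eq (cs : List Char) : PySem.Chars.splitOn cs ['\n'] = pvSplit cs := by
  have := pvSplitGo cs (cs.length + 1) [] [] (by omega)
  simp only [PySem.Chars.splitOn] at *
  rw [this]
  rcases pvSplit cs with _ | ⟨h0, t0⟩ <;> simp [List.modifyHead]

-- A's fold accumulates exactly pvSpecA
theorem pvFoldA (cs : List Char) :
    ∀ (d : Int) (acc : List String),
      (cs.foldl pvStepA (d, acc)).2 = acc ++ pvSpecA cs d := by
  induction cs with
  | nil => intro d acc; simp [pvSpecA]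
  | cons c r ih =>
    intro d acc
    simp only [List.foldl_cons, pvStepA]
    rw [show (if c = '(' then d + 1 else if c = ')' then d - 1 else d) = pvStep c d from rfl]
    by_cases h : pvStep c d ≠ 0 ∧ c = '\n'
    · obtain ⟨h1, h2⟩ := h
      subst h2
      rw [if_pos ⟨h1, rfl⟩, ih]
      simp [pvSpecA, h1]
    · rw [if_neg h, ih]
      simp only [pvSpecA, if_neg h]
      simp

-- B's fold accumulates exactly pvSpecB
theorem pvFoldB (rest : List String) :
    ∀ (d : Int) (acc : List String),
      (rest.foldl pvStepB (d, acc)).2 = acc ++ pvSpecB rest d := by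
  induction rest with
  | nil => intro d acc; simp [pvSpecB]
  | cons seg r ih =>
    intro d acc
    simp only [List.foldl_cons, pvStepB, pvSpecB]
    rw [ih]
    simp

-- flattened character output of A
def pvOutA : List Char → Int → List Char
  | [], _ => []
  | c :: r, d =>
    (if pvStep c d ≠ 0 ∧ c = '\n' then "\\LINEBREAK".toList else [c]) ++ pvOutA r (pvStep c d)

-- flattened character output of B's tail
def pvOutB : List (List Char) → Int → List Char
  | [], _ => []
  | seg :: r, d =>
    (if d ≠ 0 then "\\LINEBREAK".toList else ['\n']) ++ seg ++ pvOutB r (d + pvBalC seg)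

theorem pvSpecA_flatten (cs : List Char) :
    ∀ d, ((pvSpecA cs d).map String.toList).flatten = pvOutA cs d := by
  induction cs with
  | nil => intro d; simp [pvSpecA, pvOutA]
  | cons c r ih =>
    intro d
    simp only [pvSpecA, pvOutA, List.map_cons, List.flatten_cons, ih]
    split <;> simp

theorem pvSpecB_flatten (rest : List String) :
    ∀ d, ((pvSpecB rest d).map String.toList).flatten = pvOutB (rest.map String.toList) d := by
  induction rest with
  | nil => intro d; simp [pvSpecB, pvOutB]
  | cons seg r ih =>
    intro d
    simp only [pvSpecB, pvOutB, List.map_cons, List.flatten_cons, ih, pvBal_toList]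
    split <;> simp

theorem pvJoin_flatten (xss : List (List Char)) : PySem.Chars.join [] xss = xss.flatten := by
  induction xss with
  | nil => rfl
  | cons h t ih => cases t <;> simp_all [PySem.Chars.join, List.intercalate, List.intersperse]

theorem pvBalC_cons (c : Char) (r : List Char) :
    pvBalC (c :: r) = pvStep c 0 + pvBalC r := by
  simp [pvBalC, pvStep, List.count_cons]
  by_cases h1 : c = '(' <;> by_cases h2 : c = ')' <;> simp_all <;> omega

-- the heart: A's char machine equals segment-wise reassembly
theorem pvMain (cs : List Char) :
    ∀ (d : Int) (s0 : List Char) (rest : List (List Char)),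
      pvSplit cs = s0 :: rest → pvOutA cs d = s0 ++ pvOutB rest (d + pvBalC s0) := by
  induction cs with
  | nil =>
    intro d s0 rest h
    simp only [pvSplit] at h
    cases h
    simp [pvOutA, pvOutB]
  | cons c r ih =>
    intro d s0 rest h
    by_cases hc : c = '\n'
    · subst hc
      simp only [pvSplit, if_pos] at h
      cases h
      rcases hs : pvSplit r with _ | ⟨h0, t0⟩
      · exact absurd hs (pvSplit_ne_nil r)
      · have hstep : pvStep '\n' d = d := by simp [pvStep]
        have hz : pvBalC ([] : List Char) = 0 := by simp [pvBalC]
        simp only [pvOutA, hstep, pvOutB, hz, add_zero]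
        rw [ih d h0 t0 hs]
        simp
    · simp only [pvSplit, hc, if_neg, not_false_iff] at h
      rcases hs : pvSplit r with _ | ⟨h0, t0⟩
      · exact absurd hs (pvSplit_ne_nil r)
      · rw [hs] at h
        injection h with e1 e2
        subst e1
        subst e2
        simp only [pvOutA]
        have hif : ¬ (pvStep c d ≠ 0 ∧ c = '\n') := fun h' => hc h'.2
        rw [if_neg hif]
        rw [ih (pvStep c d) h0 t0 hs]
        have hb : pvBalC (c :: h0) = pvStep c 0 + pvBalC h0 := pvBalC_cons c h0
        have : pvStep c d = d + pvStep c 0 := by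
          simp only [pvStep]
          by_cases h1 : c = '(' <;> by_cases h2 : c = ')' <;> simp [h1, h2] <;> omega
        rw [this, hb]
        simp [add_assoc]

-- B's value when the split is known
theorem pvAltEq (code : String) (s0 : List Char) (rest : List (List Char))
    (h : PySem.Str.split? code "\n" = some (String.ofList s0 :: rest.map String.ofList)) :
    (nobracketbreaks_alt code).toList = s0 ++ pvOutB rest (pvBalC s0) := by
  unfold nobracketbreaks_alt
  rw [h]
  simp only
  rw [PySem.Str.toList_join, pvFoldB,
    show ("" : String).toList = ([] : List Char) from rfl, pvJoin_flatten]
  simp only [List.map_cons, List.flatten_cons, List.singleton_append, pvSpecB_flatten,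
    pvBal_toList, String.toList_ofList, List.map_map]
  congr 2
  rw [List.map_congr_left (fun l _ => by simp : ∀ l ∈ rest, (String.toList ∘ String.ofList) l = id l)]
  simp

-- the split? of A's input, in pvSplit form
theorem pvSplitCode (code : String) :
    PySem.Str.split? code "\n" = some ((pvSplit code.toList).map String.ofList) := by
  have h := PySem.Str.split?_map code "\n"
  rw [show ("\n" : String).toList = ['\n'] from rfl] at h
  simp only [PySem.Chars.split?, List.isEmpty, if_neg, reduceCtorEq, not_false_iff] at h
  rw [pvSplitOn_eq] at h
  rcases hx : PySem.Str.split? code "\n" with _ | segs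
  · rw [hx] at h; simp at h
  · rw [hx] at h
    simp only [Option.map_some, Option.some_inj] at h
    rw [← h, List.map_map]
    rw [List.map_congr_left (fun s _ => by simp : ∀ s ∈ segs, (String.ofList ∘ String.toList) s = id s)]
    simp

-- ===== VERDICT (by name: the statement is the Claim_ definition above) =====
theorem nobracketbreaks_spec : Claim_equal_nobracketbreaks := by
  intro code _
  unfold Spec_nobracketbreaks
  apply String.toList_inj.mp
  have hsplit := pvSplitCode code
  rcases hps : pvSplit code.toList with _ | ⟨s0, rest⟩
  · exact absurd hps (pvSplit_ne_nil code.toList)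
  · rw [hps, List.map_cons] at hsplit
    rw [pvAltEq code s0 rest hsplit]
    unfold nobracketbreaks
    rw [PySem.Str.toList_join, pvFoldA code.toList 0 [],
      show ("" : String).toList = ([] : List Char) from rfl, pvJoin_flatten]
    simp only [List.nil_append, pvSpecA_flatten]
    rw [pvMain code.toList 0 s0 rest hps]
    simp
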